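-- pv_equiv track=rewrite | github.com/RikVN/AMR | restoreAMR/restore_amr.py | get_path_to_search
-- ===== SOURCE A (Python) =====
-- def get_path_to_search(search_part):
--     '''Find the path that we will search for this AMR'''
--     add_str, cur_rel, prev_rel, add_cur_rel, start_adding = '', '', '', False, False
--
--     for ch in search_part:
--         if ch == ':':
--             add_cur_rel = True
--             cur_rel = ':'
--             if start_adding:
--                 add_str += ch
--         elif ch == '(':
--             start_adding = True
--             add_str += ch
--         elif start_adding:
--             add_str += ch
--         elif ch == ' ':
--             prev_rel = cur_rel
--             cur_rel = ''
--             add_cur_rel = False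
--         elif add_cur_rel:
--             cur_rel += ch
--     return prev_rel + ' ' + add_str
-- ===== SOURCE B (Python) =====
-- def _prev_rel(prefix):
--     last_sp = prefix.rfind(' ')
--     if last_sp == -1:
--         return ''
--     head = prefix[:last_sp]
--     seg = head[head.rfind(' ') + 1:]
--     j = seg.rfind(':')
--     return seg[j:] if j != -1 else ''
--
--
-- def get_path_to_search(search_part):
--     '''Find the path that we will search for this AMR'''
--     idx = search_part.find('(')
--     add_str = search_part[idx:] if idx != -1 else ''
--     prefix = search_part[:idx] if idx != -1 else search_part
--     return _prev_rel(prefix) + ' ' + add_str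
-- ===== Notes on version B (the rewrite author's own statement) =====
-- stated objective: faster
-- what changed: Replaced the five-variable character-by-character state machine with a direct decomposition: find the first '(' to split off the suffix to copy, then read the previous relation as the part from the last ':' of the segment before the last space of the remaining prefix, using find/rfind and slicing.
import Mathlib
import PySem

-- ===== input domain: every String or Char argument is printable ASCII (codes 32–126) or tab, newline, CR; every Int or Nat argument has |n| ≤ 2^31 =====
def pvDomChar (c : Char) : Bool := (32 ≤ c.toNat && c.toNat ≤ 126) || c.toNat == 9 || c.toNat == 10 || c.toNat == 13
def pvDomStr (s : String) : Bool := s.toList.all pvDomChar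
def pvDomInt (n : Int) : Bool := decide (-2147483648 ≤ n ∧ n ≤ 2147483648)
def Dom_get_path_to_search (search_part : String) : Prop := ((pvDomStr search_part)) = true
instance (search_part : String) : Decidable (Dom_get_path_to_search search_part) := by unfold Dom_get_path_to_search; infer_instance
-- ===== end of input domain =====

-- B replaces A's five-variable character state machine with a find/rfind/slice decomposition
-- (first '(' splits off the copied suffix; the previous relation is read off the prefix);
-- objective: faster (same O(n), measurably faster by a constant factor: bulk find/rfind/slice instead of a per-character interpreted loop).

-- ===== PORT A =====
-- one loop step of A: state = (add_str, cur_rel, prev_rel, add_cur_rel, start_adding)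
def pvStepA (st : List Char × List Char × List Char × Bool × Bool) (ch : Char) :
    List Char × List Char × List Char × Bool × Bool :=
  match st with
  | (add_str, cur_rel, prev_rel, add_cur_rel, start_adding) =>
    if ch = ':' then
      ((if start_adding then add_str ++ [ch] else add_str), [':'], prev_rel, true, start_adding)
    else if ch = '(' then
      (add_str ++ [ch], cur_rel, prev_rel, add_cur_rel, true)
    else if start_adding then
      (add_str ++ [ch], cur_rel, prev_rel, add_cur_rel, start_adding)
    else if ch = ' ' then
      (add_str, [], cur_rel, false, start_adding)
    else if add_cur_rel then
      (add_str, cur_rel ++ [ch], prev_rel, add_cur_rel, start_adding)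
    else (add_str, cur_rel, prev_rel, add_cur_rel, start_adding)

def get_path_to_search (search_part : String) : String :=
  let st := search_part.toList.foldl pvStepA ([], [], [], false, false)
  String.mk (st.2.2.1 ++ ' ' :: st.1)

-- ===== PORT B =====
-- helper _prev_rel of Source B (on char lists; PySem.Chars.* are the exact str-method semantics)
def pvPrevRel (pre : List Char) : List Char :=
  let last_sp := PySem.Chars.rfind pre [' ']
  if last_sp = -1 then []
  else
    let head := PySem.Chars.slice pre none (some last_sp)
    let seg := PySem.Chars.slice head (some (PySem.Chars.rfind head [' '] + 1)) none
    let j := PySem.Chars.rfind seg [':']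
    if j ≠ -1 then PySem.Chars.slice seg (some j) none else []

def get_path_to_search_alt (search_part : String) : String :=
  let cs := search_part.toList
  let idx := PySem.Chars.find cs ['(']
  let add_str := if idx ≠ -1 then PySem.Chars.slice cs (some idx) none else []
  let pre := if idx ≠ -1 then PySem.Chars.slice cs none (some idx) else cs
  String.mk (pvPrevRel pre ++ ' ' :: add_str)

-- ===== PRECONDITION & SPEC =====
def Spec_get_path_to_search (search_part : String) (out : String) : Prop := out = get_path_to_search_alt search_part
instance (search_part : String) (out : String) : Decidable (Spec_get_path_to_search search_part out) := by unfold Spec_get_path_to_search; infer_instance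

-- ===== CLAIM (what is proved, stated in full; the proofs are below) =====
def Claim_equal_get_path_to_search : Prop := ∀ (search_part : String), Dom_get_path_to_search search_part → Spec_get_path_to_search search_part (get_path_to_search search_part)

-- ===== LEMMAS AND PROOFS =====

-- cur_rel/add_cur_rel evolve, inside one space-free segment, by this small machine
def pvSegStep (st : List Char × Bool) (ch : Char) : List Char × Bool :=
  if ch = ':' then ([':'], true) else if st.2 then (st.1 ++ [ch], st.2) else st

-- step-evaluation lemmas for A's machine
theorem pv_stepA_colon (add cur prev : List Char) (acr sa : Bool) :
    pvStepA (add, cur, prev, acr, sa) ':' =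
      ((if sa then add ++ [':'] else add), [':'], prev, true, sa) := by
  simp [pvStepA]

theorem pv_stepA_lparen (add cur prev : List Char) (acr sa : Bool) :
    pvStepA (add, cur, prev, acr, sa) '(' = (add ++ ['('], cur, prev, acr, true) := by
  simp [pvStepA]

theorem pv_stepA_sa (add cur prev : List Char) (acr : Bool) (ch : Char)
    (h1 : ch ≠ ':') (h2 : ch ≠ '(') :
    pvStepA (add, cur, prev, acr, true) ch = (add ++ [ch], cur, prev, acr, true) := by
  simp [pvStepA, h1, h2]

theorem pv_stepA_space (add cur prev : List Char) (acr : Bool) :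
    pvStepA (add, cur, prev, acr, false) ' ' = (add, [], cur, false, false) := by
  simp [pvStepA]

theorem pv_stepA_other (add cur prev : List Char) (acr : Bool) (ch : Char)
    (h1 : ch ≠ ':') (h2 : ch ≠ '(') (h3 : ch ≠ ' ') :
    pvStepA (add, cur, prev, acr, false) ch =
      (add, (if acr then cur ++ [ch] else cur), prev, acr, false) := by
  cases acr <;> simp [pvStepA, h1, h2, h3]

theorem pv_segStep_colon (st : List Char × Bool) : pvSegStep st ':' = ([':'], true) := by
  simp [pvSegStep]

theorem pv_segStep_other (cur : List Char) (acr : Bool) (ch : Char) (h : ch ≠ ':') :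
    pvSegStep (cur, acr) ch = ((if acr then cur ++ [ch] else cur), acr) := by
  cases acr <;> simp [pvSegStep, h]

theorem pv_mem_of_singleton_isPrefixOf {c : Char} {w : List Char}
    (h : [c].isPrefixOf w = true) : c ∈ w := by
  cases w with
  | nil => simp [List.isPrefixOf] at h
  | cons x t =>
    simp [List.isPrefixOf] at h
    simp [h]

theorem pv_find_go_neg (c : Char) (l : List Char) (h : c ∉ l) (k : Nat) :
    PySem.Chars.find.go [c] l k = -1 := by
  induction l generalizing k with
  | nil => simp [PySem.Chars.find.go]
  | cons x t ih =>
    simp at h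
    rw [PySem.Chars.find.go]
    simp [List.isPrefixOf, h.1, ih h.2]

theorem pv_find_neg (c : Char) (l : List Char) (h : c ∉ l) :
    PySem.Chars.find l [c] = -1 := pv_find_go_neg c l h 0

theorem pv_find_go_pos (c : Char) (u v : List Char) (h : c ∉ u) (k : Nat) :
    PySem.Chars.find.go [c] (u ++ c :: v) k = ((k + u.length : Nat) : Int) := by
  induction u generalizing k with
  | nil =>
    simp only [List.nil_append]
    rw [PySem.Chars.find.go]
    simp [List.isPrefixOf]
  | cons x t ih =>
    simp at h
    simp only [List.cons_append]
    rw [PySem.Chars.find.go]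
    simp only [List.isPrefixOf]
    have hx : (c == x) = false := by simp [h.1]
    simp only [hx, Bool.false_and, Bool.false_eq_true, if_false]
    rw [ih h.2 (k + 1)]
    congr 1
    simp
    omega

theorem pv_find_pos (c : Char) (u v : List Char) (h : c ∉ u) :
    PySem.Chars.find (u ++ c :: v) [c] = (u.length : Int) := by
  have := pv_find_go_pos c u v h 0
  simpa [PySem.Chars.find] using this

theorem pv_rfind_go_neg (c : Char) (l : List Char) (h : c ∉ l) (j : Nat) :
    PySem.Chars.rfind.go l [c] j = -1 := by
  induction j with
  | zero =>
    rw [PySem.Chars.rfind.go]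
    have : ¬ ([c].isPrefixOf l = true) := fun hp => h (pv_mem_of_singleton_isPrefixOf hp)
    simp [this]
  | succ j ih =>
    rw [PySem.Chars.rfind.go]
    have : ¬ ([c].isPrefixOf (l.drop (j + 1)) = true) := by
      intro hp
      exact h (List.mem_of_mem_drop (pv_mem_of_singleton_isPrefixOf hp))
    simp [this, ih]

theorem pv_rfind_neg (c : Char) (l : List Char) (h : c ∉ l) :
    PySem.Chars.rfind l [c] = -1 := pv_rfind_go_neg c l h l.length

theorem pv_rfind_go_pos (c : Char) (u v : List Char) (hv : c ∉ v) (j : Nat)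
    (h1 : u.length ≤ j) (h2 : j ≤ (u ++ c :: v).length) :
    PySem.Chars.rfind.go (u ++ c :: v) [c] j = (u.length : Int) := by
  induction j with
  | zero =>
    have hu : u = [] := by
      cases u with
      | nil => rfl
      | cons a b => simp at h1
    subst hu
    rw [PySem.Chars.rfind.go]
    simp [List.isPrefixOf]
  | succ j ih =>
    rw [PySem.Chars.rfind.go]
    by_cases he : u.length = j + 1
    · have hdr : List.drop (j + 1) (u ++ c :: v) = c :: v := by
        rw [← he]; exact List.drop_left
      simp [hdr, List.isPrefixOf, he]
    · have hlt : u.length ≤ j := by omega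
      have hnp : ¬ ([c].isPrefixOf ((u ++ c :: v).drop (j + 1)) = true) := by
        intro hp
        have hm := pv_mem_of_singleton_isPrefixOf hp
        have hdr : (u ++ c :: v).drop (j + 1) = v.drop (j - u.length) := by
          rw [List.drop_append, List.drop_of_length_le (by omega)]
          have : j + 1 - u.length = (j - u.length) + 1 := by omega
          rw [this, List.drop_succ_cons]
          simp
        rw [hdr] at hm
        exact hv (List.mem_of_mem_drop hm)
      simp only [hnp, if_false]
      exact ih hlt (by omega)

theorem pv_rfind_pos (c : Char) (u v : List Char) (hv : c ∉ v) :
    PySem.Chars.rfind (u ++ c :: v) [c] = (u.length : Int) := by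
  have : u.length ≤ (u ++ c :: v).length := by simp
  exact pv_rfind_go_pos c u v hv (u ++ c :: v).length this le_rfl

-- last-occurrence decomposition
theorem pv_last_occ {c : Char} {l : List Char} (h : c ∈ l) :
    ∃ u v, l = u ++ c :: v ∧ c ∉ v := by
  have h' : c ∈ l.reverse := by simpa using h
  obtain ⟨s, t, hst, hns⟩ := List.eq_append_cons_of_mem h'
  refine ⟨t.reverse, s.reverse, ?_, by simpa using hns⟩
  have := congrArg List.reverse hst
  simpa using this

-- segment machine facts
theorem pv_seg_no_colon (l : List Char) (h : (':' : Char) ∉ l) (cur : List Char) :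
    List.foldl pvSegStep (cur, false) l = (cur, false) := by
  induction l generalizing cur with
  | nil => rfl
  | cons x t ih =>
    simp at h
    rw [List.foldl_cons, pv_segStep_other cur false x (Ne.symm h.1)]
    simp only [if_neg (Bool.false_ne_true)]
    exact ih h.2 cur

theorem pv_seg_adding (l : List Char) (h : (':' : Char) ∉ l) (cur : List Char) :
    List.foldl pvSegStep (cur, true) l = (cur ++ l, true) := by
  induction l generalizing cur with
  | nil => simp
  | cons x t ih =>
    simp at h
    rw [List.foldl_cons, pv_segStep_other cur true x (Ne.symm h.1)]
    simp only [if_true]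
    rw [ih h.2]
    simp

theorem pv_seg_colon (w z : List Char) (hz : (':' : Char) ∉ z) (st : List Char × Bool) :
    List.foldl pvSegStep st (w ++ ':' :: z) = (':' :: z, true) := by
  rw [List.foldl_append, List.foldl_cons, pv_segStep_colon]
  exact pv_seg_adding z hz [':']

-- the relation read off a segment equals Source B's rfind-':' computation
theorem pv_seg_rel (seg : List Char) :
    (List.foldl pvSegStep ([], false) seg).1 =
      (let j := PySem.Chars.rfind seg [':'];
       if j ≠ -1 then PySem.Chars.slice seg (some j) none else []) := by
  by_cases h : (':' : Char) ∈ seg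
  · obtain ⟨w, z, rfl, hz⟩ := pv_last_occ h
    rw [pv_seg_colon w z hz]
    simp only [pv_rfind_pos ':' w z hz]
    have hne : ((w.length : Int)) ≠ -1 := by omega
    rw [if_pos hne]
    simp [PySem.Chars.slice_eq_listSlice, PySem.List.slice_from_natCast]
  · rw [pv_seg_no_colon seg h []]
    simp [pv_rfind_neg ':' seg h]

-- A's fold once start_adding is true: everything is appended, prev_rel frozen
theorem pv_fold_adding (l : List Char) (add cur prev : List Char) (acr : Bool) :
    ∃ c a, List.foldl pvStepA (add, cur, prev, acr, true) l = (add ++ l, c, prev, a, true) := by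
  induction l generalizing add cur acr with
  | nil => exact ⟨cur, acr, by simp⟩
  | cons x t ih =>
    rw [List.foldl_cons]
    by_cases hx : x = ':'
    · subst hx
      rw [pv_stepA_colon, if_pos rfl]
      obtain ⟨c, a, hca⟩ := ih (add ++ [':']) [':'] true
      exact ⟨c, a, by simpa using hca⟩
    · by_cases hp : x = '('
      · subst hp
        rw [pv_stepA_lparen]
        obtain ⟨c, a, hca⟩ := ih (add ++ ['(']) cur acr
        exact ⟨c, a, by simpa using hca⟩
      · rw [pv_stepA_sa add cur prev acr x hx hp]
        obtain ⟨c, a, hca⟩ := ih (add ++ [x]) cur acr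
        exact ⟨c, a, by simpa using hca⟩

-- A's fold before any '(': add_str and start_adding unchanged
theorem pv_fold_quiet (l : List Char) (h : ('(' : Char) ∉ l) (add cur prev : List Char) (acr : Bool) :
    ∃ c p a, List.foldl pvStepA (add, cur, prev, acr, false) l = (add, c, p, a, false) := by
  induction l generalizing cur prev acr with
  | nil => exact ⟨cur, prev, acr, rfl⟩
  | cons x t ih =>
    simp at h
    rw [List.foldl_cons]
    by_cases hx : x = ':'
    · subst hx
      rw [pv_stepA_colon, if_neg (Bool.false_ne_true)]
      exact ih h.2 [':'] prev true
    · by_cases hs : x = ' '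
      · subst hs
        rw [pv_stepA_space]
        exact ih h.2 [] cur false
      · rw [pv_stepA_other add cur prev acr x hx (Ne.symm h.1) hs]
        exact ih h.2 _ prev acr

-- A's fold in one space-'(' free stretch tracks the segment machine, prev_rel untouched
theorem pv_fold_seg (l : List Char) (hsp : (' ' : Char) ∉ l) (hpar : ('(' : Char) ∉ l)
    (add cur prev : List Char) (acr : Bool) :
    List.foldl pvStepA (add, cur, prev, acr, false) l =
      (add, (List.foldl pvSegStep (cur, acr) l).1, prev, (List.foldl pvSegStep (cur, acr) l).2, false) := by
  induction l generalizing cur acr with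
  | nil => rfl
  | cons x t ih =>
    simp at hsp hpar
    rw [List.foldl_cons, List.foldl_cons]
    by_cases hx : x = ':'
    · subst hx
      rw [pv_stepA_colon, if_neg (Bool.false_ne_true), pv_segStep_colon]
      exact ih hsp.2 hpar.2 [':'] true
    · rw [pv_stepA_other add cur prev acr x hx (Ne.symm hpar.1) (Ne.symm hsp.1),
        pv_segStep_other cur acr x hx]
      exact ih hsp.2 hpar.2 _ acr

-- the suffix after the last space, as Source B computes it with rfind/slicing
theorem pv_suffix_no_space (h : List Char) (hsp : (' ' : Char) ∉ h) :
    PySem.Chars.slice h (some (PySem.Chars.rfind h [' '] + 1)) none = h := by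
  rw [pv_rfind_neg ' ' h hsp]
  norm_num

theorem pv_suffix_space (h1 h2 : List Char) (hh2 : (' ' : Char) ∉ h2) :
    PySem.Chars.slice (h1 ++ ' ' :: h2)
      (some (PySem.Chars.rfind (h1 ++ ' ' :: h2) [' '] + 1)) none = h2 := by
  rw [pv_rfind_pos ' ' h1 h2 hh2]
  have hc : ((h1.length : Int) + 1) = ((h1.length + 1 : Nat) : Int) := by push_cast; ring
  rw [hc, PySem.Chars.slice_eq_listSlice, PySem.List.slice_from_natCast]
  rw [List.drop_append, List.drop_of_length_le (by omega)]
  have : h1.length + 1 - h1.length = 1 := by omega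
  rw [this, List.drop_succ_cons]
  simp

-- cur_rel/add_cur_rel after a '('-free prefix h = segment machine on the part after h's last space
theorem pv_fold_cur (h : List Char) (hpar : ('(' : Char) ∉ h) :
    ∃ p, List.foldl pvStepA ([], [], [], false, false) h =
      ([], (List.foldl pvSegStep ([], false)
              (PySem.Chars.slice h (some (PySem.Chars.rfind h [' '] + 1)) none)).1,
        p,
        (List.foldl pvSegStep ([], false)
              (PySem.Chars.slice h (some (PySem.Chars.rfind h [' '] + 1)) none)).2,
        false) := by
  by_cases hsp : (' ' : Char) ∈ h
  · obtain ⟨h1, h2, rfl, hh2⟩ := pv_last_occ hsp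
    have hpar1 : ('(' : Char) ∉ h1 := fun hc => hpar (by simp [hc])
    have hpar2 : ('(' : Char) ∉ h2 := fun hc => hpar (by simp [hc])
    rw [pv_suffix_space h1 h2 hh2, List.foldl_append]
    obtain ⟨c, p, a, hq⟩ := pv_fold_quiet h1 hpar1 [] [] [] false
    rw [hq, List.foldl_cons, pv_stepA_space]
    rw [pv_fold_seg h2 hh2 hpar2 [] [] c false]
    exact ⟨c, rfl⟩
  · rw [pv_suffix_no_space h hsp, pv_fold_seg h hsp hpar [] [] [] false]
    exact ⟨[], rfl⟩

-- prev_rel after a '('-free prefix equals Source B's _prev_rel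
theorem pv_fold_prev (p : List Char) (hpar : ('(' : Char) ∉ p) :
    ∃ c a, List.foldl pvStepA ([], [], [], false, false) p = ([], c, pvPrevRel p, a, false) := by
  by_cases hsp : (' ' : Char) ∈ p
  · obtain ⟨h, t, rfl, ht⟩ := pv_last_occ hsp
    have hparh : ('(' : Char) ∉ h := fun hc => hpar (by simp [hc])
    have hpart : ('(' : Char) ∉ t := fun hc => hpar (by simp [hc])
    rw [List.foldl_append]
    obtain ⟨pp, hcur⟩ := pv_fold_cur h hparh
    rw [hcur, List.foldl_cons, pv_stepA_space]
    rw [pv_fold_seg t ht hpart [] [] _ false]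
    have hprev : pvPrevRel (h ++ ' ' :: t) =
        (List.foldl pvSegStep ([], false)
          (PySem.Chars.slice h (some (PySem.Chars.rfind h [' '] + 1)) none)).1 := by
      unfold pvPrevRel
      rw [pv_rfind_pos ' ' h t ht]
      have hne : ((h.length : Int)) ≠ -1 := by omega
      rw [if_neg hne]
      have hhd : PySem.Chars.slice (h ++ ' ' :: t) none (some (h.length : Int)) = h := by
        rw [PySem.Chars.slice_eq_listSlice, PySem.List.slice_to_natCast]
        simp
      rw [hhd, pv_seg_rel]
    rw [hprev]
    exact ⟨_, _, rfl⟩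
  · rw [pv_fold_seg p hsp hpar [] [] [] false]
    have hpr : pvPrevRel p = [] := by
      unfold pvPrevRel
      rw [pv_rfind_neg ' ' p hsp]
      simp
    rw [hpr]
    exact ⟨_, _, rfl⟩

-- ===== VERDICT (by name: the statement is the Claim_ definition above) =====
theorem get_path_to_search_spec : Claim_equal_get_path_to_search := by
  intro s _
  unfold Spec_get_path_to_search
  simp only [get_path_to_search, get_path_to_search_alt]
  by_cases hpar : ('(' : Char) ∈ s.toList
  · obtain ⟨u, v, hs, hu⟩ := List.eq_append_cons_of_mem hpar
    rw [hs]
    have hidx : PySem.Chars.find (u ++ '(' :: v) ['('] = (u.length : Int) := pv_find_pos '(' u v hu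
    rw [hidx]
    have hne : ((u.length : Int)) ≠ -1 := by omega
    rw [if_pos hne, if_pos hne]
    have hadd : PySem.Chars.slice (u ++ '(' :: v) (some (u.length : Int)) none = '(' :: v := by
      rw [PySem.Chars.slice_eq_listSlice, PySem.List.slice_from_natCast, List.drop_left]
    have hpre : PySem.Chars.slice (u ++ '(' :: v) none (some (u.length : Int)) = u := by
      rw [PySem.Chars.slice_eq_listSlice, PySem.List.slice_to_natCast, List.take_left]
    rw [hadd, hpre]
    rw [List.foldl_append]
    obtain ⟨c, a, hfp⟩ := pv_fold_prev u hu
    rw [hfp, List.foldl_cons, pv_stepA_lparen]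
    obtain ⟨c2, a2, hfa⟩ := pv_fold_adding v ([] ++ ['(']) c (pvPrevRel u) a
    rw [hfa]
    simp
  · have hidx : PySem.Chars.find s.toList ['('] = -1 := pv_find_neg '(' s.toList hpar
    rw [hidx]
    simp only [ne_eq, not_true_eq_false, if_false]
    obtain ⟨c, a, hfp⟩ := pv_fold_prev s.toList hpar
    rw [hfp]
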